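-- pv_equiv track=rewrite | github.com/habibor-rahaman1010/Learn_Python3 | Basic_python/problem_solve/problem-3.py | minimize_number
-- ===== SOURCE A (Python) =====
-- def minimize_number(n, nums):
--     count = 0
--     while True:
--         for i in range(n):
--             if nums[i] % 2 == 0:
--                 nums[i] = nums[i] // 2
--             else:
--                 return count
--         count += 1
-- ===== SOURCE B (Python) =====
-- def _v2(x):
--     k = 0
--     while x % 2 == 0:
--         x //= 2
--         k += 1
--     return k
--
-- def minimize_number(n, nums):
--     # one pass: the answer is the minimum 2-adic valuation among the
--     # (nonzero) elements considered by the original repeated-halving loop.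
--     # NOTE: unlike A, this does not mutate nums.
--     return min(_v2(x) for x in nums[:n] if x != 0)
-- ===== Notes on version B (the rewrite author's own statement) =====
-- stated objective: simpler
-- what changed: Replaces A's repeated full passes that halve every element of a mutated list until one turns odd by a single pass taking the min of each element's 2-adic valuation; B does not mutate nums (return value is what is proved equal).
import Mathlib
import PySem

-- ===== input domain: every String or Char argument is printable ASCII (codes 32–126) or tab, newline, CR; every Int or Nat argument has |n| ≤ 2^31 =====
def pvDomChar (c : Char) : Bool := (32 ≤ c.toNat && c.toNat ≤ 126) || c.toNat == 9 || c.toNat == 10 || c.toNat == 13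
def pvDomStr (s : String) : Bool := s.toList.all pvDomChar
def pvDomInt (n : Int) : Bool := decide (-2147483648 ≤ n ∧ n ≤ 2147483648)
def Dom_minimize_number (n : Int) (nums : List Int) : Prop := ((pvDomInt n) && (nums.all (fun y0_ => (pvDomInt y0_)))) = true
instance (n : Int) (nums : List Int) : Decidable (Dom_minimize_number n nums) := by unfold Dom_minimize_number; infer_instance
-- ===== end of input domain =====

-- B replaces A's repeated halving passes over a (mutated) list by one pass taking the min of
-- each element's 2-adic valuation; A mutates nums in place, B does not — the equivalence proved
-- here is about the RETURN value only.


-- ===== PORT A =====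
-- one 'for i in range(n)' pass: halves even elements in order, 'none' = the early 'return count'
-- (first odd element reached); the k+1/[] case is Python's IndexError (excluded by Pre_).
def pvPassA : Nat → List Int → Option (List Int)
  | 0, xs => some xs
  | _ + 1, [] => some []
  | k + 1, x :: xs =>
      if PySem.Int.mod x 2 = 0 then
        (pvPassA k xs).map (fun t => PySem.Int.floordiv x 2 :: t)
      else none

-- the 'while True' loop; fuel makes it total: under Dom ∧ Pre_ the answer is ≤ 31 < 64
-- (|x| ≤ 2^31), so fuel 64 is never exhausted on admitted inputs.
def pvLoopA : Nat → Nat → List Int → Int → Int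
  | 0, _, _, count => count
  | fuel + 1, k, xs, count =>
      match pvPassA k xs with
      | none => count
      | some xs' => pvLoopA fuel k xs' (count + 1)

def minimize_number (n : Int) (nums : List Int) : Int := pvLoopA 64 n.toNat nums 0

-- ===== PORT B =====
-- _v2: the while-loop with accumulator k; the 'x ≠ 0' conjunct only makes the loop total
-- (B only calls it on nonzero x, where Python's loop terminates the same way).
def pvV2 (x : Int) (k : Int) : Int :=
  if x ≠ 0 ∧ PySem.Int.mod x 2 = 0 then pvV2 (PySem.Int.floordiv x 2) (k + 1) else k
termination_by x.natAbs
decreasing_by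
  rename_i h
  have h2 : (2 : Int) ∣ x := (PySem.Int.mod_eq_zero_iff_dvd x 2).mp h.2
  have he : PySem.Int.floordiv x 2 = x / 2 := PySem.Int.floordiv_eq_ediv_of_pos (by omega)
  rw [he]
  rcases h2 with ⟨c, rfl⟩
  have hc : c ≠ 0 := by rintro rfl; simp at h
  simp [Int.natAbs_mul]
  omega

-- min(_v2(x) for x in nums[:n] if x != 0); 'none' branch = Python's ValueError on the empty
-- generator (excluded by Pre_).
def minimize_number_alt (n : Int) (nums : List Int) : Int :=
  match PySem.List.min?
      (((PySem.List.slice nums none (some n)).filter (fun x => x != 0)).map (fun x => pvV2 x 0))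
      (fun y => y) with
  | some m => m
  | none => 0

-- ===== PRECONDITION & SPEC =====
-- Pre_ is exactly where Python A returns: n ≤ 0 or an all-zero considered prefix diverges;
-- n > len(nums) with no odd element raises IndexError.
def Pre_minimize_number (n : Int) (nums : List Int) : Prop :=
  0 < n ∧ ((n ≤ (nums.length : Int) ∧ ∃ x ∈ nums.take n.toNat, x ≠ 0) ∨
           ((nums.length : Int) < n ∧ ∃ x ∈ nums, PySem.Int.mod x 2 ≠ 0))
instance (n : Int) (nums : List Int) : Decidable (Pre_minimize_number n nums) := by
  unfold Pre_minimize_number; infer_instance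

def pvWitness_minimize_number : Int × List Int := (3, [4, 6, 12])

def Spec_minimize_number (n : Int) (nums : List Int) (out : Int) : Prop := out = minimize_number_alt n nums
instance (n : Int) (nums : List Int) (out : Int) : Decidable (Spec_minimize_number n nums out) := by unfold Spec_minimize_number; infer_instance

-- ===== CLAIM (what is proved, stated in full; the proofs are below) =====
def Claim_equal_minimize_number : Prop := ∀ (n : Int) (nums : List Int), Dom_minimize_number n nums → Pre_minimize_number n nums → Spec_minimize_number n nums (minimize_number n nums)

-- ===== LEMMAS AND PROOFS =====

-- arithmetic facts about halving an even integer
lemma halve_mul_two (x : Int) (he : PySem.Int.mod x 2 = 0) :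
    PySem.Int.floordiv x 2 * 2 = x := by
  have := PySem.Int.floordiv_mul_add_mod x 2
  omega

lemma halve_natAbs_eq (x : Int) (he : PySem.Int.mod x 2 = 0) :
    x.natAbs = (PySem.Int.floordiv x 2).natAbs * 2 := by
  conv_lhs => rw [← halve_mul_two x he]
  rw [Int.natAbs_mul]
  norm_num

lemma halve_natAbs_lt (x : Int) (hx : x ≠ 0) (he : PySem.Int.mod x 2 = 0) :
    (PySem.Int.floordiv x 2).natAbs < x.natAbs := by
  have h := halve_natAbs_eq x he
  have hx0 : x.natAbs ≠ 0 := Int.natAbs_ne_zero.mpr hx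
  omega

lemma halve_ne_zero (x : Int) (hx : x ≠ 0) (he : PySem.Int.mod x 2 = 0) :
    PySem.Int.floordiv x 2 ≠ 0 := by
  have h := halve_natAbs_eq x he
  have hx0 : x.natAbs ≠ 0 := Int.natAbs_ne_zero.mpr hx
  intro h0
  rw [h0] at h
  simp at h
  exact hx h

lemma pvV2_eq (x k : Int) :
    pvV2 x k = if x ≠ 0 ∧ PySem.Int.mod x 2 = 0
               then pvV2 (PySem.Int.floordiv x 2) (k + 1) else k := by
  conv_lhs => rw [pvV2]

-- the accumulator k just adds k to pvV2 … 0
lemma pvV2_shift : ∀ (m : Nat) (x : Int), x.natAbs = m → ∀ k, pvV2 x k = k + pvV2 x 0 := by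
  intro m
  induction m using Nat.strong_induction_on with
  | _ m IH =>
    intro x hx k
    by_cases h : x ≠ 0 ∧ PySem.Int.mod x 2 = 0
    · have hlt : (PySem.Int.floordiv x 2).natAbs < m := hx ▸ halve_natAbs_lt x h.1 h.2
      rw [pvV2_eq x k, pvV2_eq x 0, if_pos h, if_pos h,
          IH _ hlt _ rfl (k + 1), IH _ hlt _ rfl (0 + 1)]
      ring
    · rw [pvV2_eq x k, pvV2_eq x 0, if_neg h, if_neg h]
      ring

lemma pvV2_odd (x : Int) (ho : PySem.Int.mod x 2 ≠ 0) : pvV2 x 0 = 0 := by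
  rw [pvV2_eq, if_neg (by tauto)]

lemma pvV2_even (x : Int) (hx : x ≠ 0) (he : PySem.Int.mod x 2 = 0) :
    pvV2 x 0 = 1 + pvV2 (PySem.Int.floordiv x 2) 0 := by
  rw [pvV2_eq, if_pos ⟨hx, he⟩, pvV2_shift _ _ rfl (0 + 1)]
  ring

lemma pvV2_nonneg : ∀ (m : Nat) (x : Int), x.natAbs = m → 0 ≤ pvV2 x 0 := by
  intro m
  induction m using Nat.strong_induction_on with
  | _ m IH =>
    intro x hx
    by_cases h : x ≠ 0 ∧ PySem.Int.mod x 2 = 0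
    · have hlt : (PySem.Int.floordiv x 2).natAbs < m := hx ▸ halve_natAbs_lt x h.1 h.2
      have := IH _ hlt _ rfl
      rw [pvV2_even x h.1 h.2]; omega
    · rw [pvV2_eq, if_neg h]

lemma pvV2_pow_le : ∀ (m : Nat) (x : Int), x.natAbs = m → x ≠ 0 →
    2 ^ (pvV2 x 0).toNat ≤ x.natAbs := by
  intro m
  induction m using Nat.strong_induction_on with
  | _ m IH =>
    intro x hx hne
    by_cases he : PySem.Int.mod x 2 = 0
    · have hlt : (PySem.Int.floordiv x 2).natAbs < m := hx ▸ halve_natAbs_lt x hne he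
      have hne2 := halve_ne_zero x hne he
      have hrec := IH _ hlt _ rfl hne2
      have hnn := pvV2_nonneg _ (PySem.Int.floordiv x 2) rfl
      rw [pvV2_even x hne he]
      have ht : (1 + pvV2 (PySem.Int.floordiv x 2) 0).toNat
          = (pvV2 (PySem.Int.floordiv x 2) 0).toNat + 1 := by omega
      have h2 := halve_natAbs_eq x he
      rw [ht, pow_succ]
      omega
    · rw [pvV2_odd x he]
      have hx0 : x.natAbs ≠ 0 := Int.natAbs_ne_zero.mpr hne
      simp
      omega

lemma pvV2_le_31 (x : Int) (hx : x ≠ 0) (hb : pvDomInt x = true) : pvV2 x 0 ≤ 31 := by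
  have hp := pvV2_pow_le x.natAbs x rfl hx
  have hnn := pvV2_nonneg x.natAbs x rfl
  have hb' : x.natAbs ≤ 2 ^ 31 := by
    simp [pvDomInt] at hb; omega
  have : (pvV2 x 0).toNat ≤ 31 := by
    by_contra hc
    have : 2 ^ 32 ≤ 2 ^ (pvV2 x 0).toNat :=
      Nat.pow_le_pow_right (by omega) (by omega)
    omega
  omega

-- one pass of A returns early iff an odd element is reached
lemma pass_none : ∀ (xs : List Int) (k : Nat),
    (∃ x ∈ xs.take k, PySem.Int.mod x 2 ≠ 0) → pvPassA k xs = none := by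
  intro xs
  induction xs with
  | nil => intro k h; simp at h
  | cons x xs ih =>
    intro k h
    cases k with
    | zero => simp at h
    | succ k =>
      simp only [List.take_succ_cons, List.mem_cons] at h
      by_cases he : PySem.Int.mod x 2 = 0
      · have htail : ∃ y ∈ xs.take k, PySem.Int.mod y 2 ≠ 0 := by
          rcases h with ⟨y, hy, hodd⟩
          rcases hy with rfl | hy
          · exact absurd he hodd
          · exact ⟨y, hy, hodd⟩
        simp only [pvPassA]
        rw [if_pos he, ih k htail]
        rfl
      · simp only [pvPassA]
        rw [if_neg he]

lemma pass_all_even : ∀ (xs : List Int) (k : Nat),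
    (∀ x ∈ xs.take k, PySem.Int.mod x 2 = 0) →
    pvPassA k xs = some ((xs.take k).map (fun x => PySem.Int.floordiv x 2) ++ xs.drop k) := by
  intro xs
  induction xs with
  | nil => intro k _; cases k <;> simp [pvPassA]
  | cons x xs ih =>
    intro k h
    cases k with
    | zero => simp [pvPassA]
    | succ k =>
      simp only [List.take_succ_cons, List.mem_cons] at h
      have he : PySem.Int.mod x 2 = 0 := h x (Or.inl rfl)
      have ht : ∀ y ∈ xs.take k, PySem.Int.mod y 2 = 0 := fun y hy => h y (Or.inr hy)
      simp only [pvPassA]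
      rw [if_pos he, ih k ht]
      simp only [List.take_succ_cons, List.drop_succ_cons, List.map_cons, List.cons_append,
        Option.map_some]

lemma take_shape (f : Int → Int) : ∀ (xs : List Int) (k : Nat),
    ((xs.take k).map f ++ xs.drop k).take k = (xs.take k).map f := by
  intro xs
  induction xs with
  | nil => intro k; simp
  | cons x xs ih =>
    intro k
    cases k with
    | zero => simp
    | succ k =>
      simp only [List.take_succ_cons, List.drop_succ_cons, List.map_cons, List.cons_append]
      rw [ih k]

-- after an all-even pass, every considered valuation drops by exactly one
lemma filter_map_halve : ∀ (P : List Int),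
    (∀ x ∈ P, PySem.Int.mod x 2 = 0) →
    ((P.map (fun x => PySem.Int.floordiv x 2)).filter (fun x => x != 0)).map (fun x => pvV2 x 0)
      = (((P.filter (fun x => x != 0)).map (fun x => pvV2 x 0)).map (fun v => v - 1)) := by
  intro P
  induction P with
  | nil => intro _; simp
  | cons x P ih =>
    intro h
    have he : PySem.Int.mod x 2 = 0 := h x (List.mem_cons_self ..)
    have ht := ih (fun y hy => h y (List.mem_cons_of_mem _ hy))
    simp only [List.map_cons, List.filter_cons]
    by_cases hx : x = 0
    · subst hx
      rw [show PySem.Int.floordiv 0 2 = 0 from rfl]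
      rw [if_neg (by decide), if_neg (by decide)]
      exact ht
    · have hne := halve_ne_zero x hx he
      have hbx : (x != 0) = true := bne_iff_ne.mpr hx
      have hbh : (PySem.Int.floordiv x 2 != 0) = true := bne_iff_ne.mpr hne
      rw [if_pos hbh, if_pos hbx]
      simp only [List.map_cons]
      rw [ht]
      have hv := pvV2_even x hx he
      congr 1
      omega

-- Python's min(L) for nonempty L
def pyMin (L : List Int) : Int :=
  match PySem.List.min? L (fun y => y) with
  | some m => m
  | none => 0

lemma pyMin_some (L : List Int) (h : L ≠ []) :
    PySem.List.min? L (fun y => y) = some (pyMin L) := by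
  cases L with
  | nil => exact absurd rfl h
  | cons x t =>
    unfold pyMin
    rw [PySem.List.min?_id_cons]

lemma pyMin_mem (L : List Int) (h : L ≠ []) : pyMin L ∈ L :=
  PySem.List.min?_mem (pyMin_some L h)

lemma pyMin_le (L : List Int) (h : L ≠ []) : ∀ y ∈ L, pyMin L ≤ y :=
  PySem.List.min?_isMin (pyMin_some L h)

lemma pyMin_eq (L : List Int) (m : Int) (h : L ≠ []) (hm : m ∈ L)
    (hle : ∀ y ∈ L, m ≤ y) : pyMin L = m :=
  le_antisymm (pyMin_le L h m hm) (hle _ (pyMin_mem L h))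

lemma pyMin_map_sub_one (L : List Int) (h : L ≠ []) :
    pyMin (L.map (fun v => v - 1)) = pyMin L - 1 := by
  apply pyMin_eq
  · simp [h]
  · exact List.mem_map.mpr ⟨pyMin L, pyMin_mem L h, rfl⟩
  · intro y hy
    rcases List.mem_map.mp hy with ⟨z, hz, rfl⟩
    have := pyMin_le L h z hz
    omega

-- all entries of the valuation list are nonnegative
lemma mem_L_nonneg (P : List Int) :
    ∀ y ∈ (P.filter (fun x => x != 0)).map (fun x => pvV2 x 0), 0 ≤ y := by
  intro y hy
  rcases List.mem_map.mp hy with ⟨z, _, rfl⟩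
  exact pvV2_nonneg z.natAbs z rfl

-- MAIN LOOP INVARIANT: with enough fuel, A's loop returns count + min valuation
lemma loopA_eq : ∀ (fuel k : Nat) (xs : List Int) (count : Int),
    ((xs.take k).filter (fun x => x != 0)).map (fun x => pvV2 x 0) ≠ [] →
    pyMin (((xs.take k).filter (fun x => x != 0)).map (fun x => pvV2 x 0)) < (fuel : Int) →
    pvLoopA fuel k xs count
      = count + pyMin (((xs.take k).filter (fun x => x != 0)).map (fun x => pvV2 x 0)) := by
  intro fuel
  induction fuel with
  | zero =>
    intro k xs count hne hlt
    have := mem_L_nonneg (xs.take k) _ (pyMin_mem _ hne)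
    simp at hlt
    omega
  | succ fuel ih =>
    intro k xs count hne hlt
    by_cases h0 : ∃ x ∈ xs.take k, PySem.Int.mod x 2 ≠ 0
    · -- an odd element exists: the pass returns early, and the min valuation is 0
      have hmin : pyMin (((xs.take k).filter (fun x => x != 0)).map (fun x => pvV2 x 0)) = 0 := by
        rcases h0 with ⟨x, hx, hodd⟩
        have hxne : x ≠ 0 := by rintro rfl; exact hodd (by decide)
        apply pyMin_eq
        · exact hne
        · exact List.mem_map.mpr ⟨x, List.mem_filter.mpr ⟨hx, by simp [hxne]⟩, pvV2_odd x hodd⟩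
        · exact mem_L_nonneg (xs.take k)
      rw [hmin]
      simp [pvLoopA, pass_none xs k h0]
    · -- every considered element is even: halve everything and recurse
      push Not at h0
      have hpass := pass_all_even xs k h0
      have htake := take_shape (fun x => PySem.Int.floordiv x 2) xs k
      have hL' := filter_map_halve (xs.take k) h0
      simp only [pvLoopA, hpass]
      rw [ih k _ (count + 1)]
      · rw [htake, hL', pyMin_map_sub_one _ hne]
        ring
      · rw [htake, hL']
        intro hcon
        exact hne (List.map_eq_nil_iff.mp hcon)
      · rw [htake, hL', pyMin_map_sub_one _ hne]
        push_cast at hlt ⊢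
        omega

theorem minimize_number_spec : Claim_equal_minimize_number := by
  unfold Claim_equal_minimize_number
  intro n nums hDom hPre
  unfold Spec_minimize_number
  obtain ⟨hn0, hcase⟩ := hPre
  -- B's value is pyMin of the valuation list over the considered prefix
  have hslice : PySem.List.slice nums none (some n) = nums.take n.toNat :=
    PySem.List.slice_to nums (le_of_lt hn0)
  have hBalt : minimize_number_alt n nums
      = pyMin (((nums.take n.toNat).filter (fun x => x != 0)).map (fun x => pvV2 x 0)) := by
    unfold minimize_number_alt pyMin
    rw [hslice]
  -- a nonzero element in the considered prefix
  have hx : ∃ x ∈ nums.take n.toNat, x ≠ 0 := by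
    rcases hcase with ⟨_, x, hx, hne⟩ | ⟨hlen, x, hx, hodd⟩
    · exact ⟨x, hx, hne⟩
    · have htk : nums.take n.toNat = nums := List.take_of_length_le (by omega)
      refine ⟨x, by rw [htk]; exact hx, ?_⟩
      rintro rfl; exact hodd (by decide)
    
  rcases hx with ⟨x, hxmem, hxne⟩
  have hxnums : x ∈ nums := List.mem_of_mem_take hxmem
  have hxdom : pvDomInt x = true := by
    simp only [Dom_minimize_number, Bool.and_eq_true, List.all_eq_true] at hDom
    exact hDom.2 x hxnums
  have hvmem : pvV2 x 0 ∈ ((nums.take n.toNat).filter (fun x => x != 0)).map (fun x => pvV2 x 0) :=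
    List.mem_map.mpr ⟨x, List.mem_filter.mpr ⟨hxmem, by simp [hxne]⟩, rfl⟩
  have hne : ((nums.take n.toNat).filter (fun x => x != 0)).map (fun x => pvV2 x 0) ≠ [] := by
    intro h; rw [h] at hvmem; simp at hvmem
  have hlt : pyMin (((nums.take n.toNat).filter (fun x => x != 0)).map (fun x => pvV2 x 0)) < (64 : Int) := by
    have h1 := pyMin_le _ hne _ hvmem
    have h2 := pvV2_le_31 x hxne hxdom
    omega
  have := loopA_eq 64 n.toNat nums 0 hne (by exact_mod_cast hlt)
  unfold minimize_number
  rw [this, hBalt]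
  ring
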